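-- pv_equiv track=rewrite | github.com/lightbeamai/lb-installer | orchestration/deployment_mgr.py | edge_cloud_from_deployment_type
-- ===== SOURCE A (Python) =====
-- def edge_cloud_from_deployment_type(dt: str) -> tuple:
--     """Extract (cloud, region) from deployment type like 'aws-edge-us-east-1'."""
--     for cloud in ("aws", "gcp"):
--         prefix = f"{cloud}-edge"
--         if dt == prefix:
--             return cloud, ""
--         if dt.startswith(prefix + "-"):
--             return cloud, dt[len(prefix) + 1:]
--     return "", ""
-- ===== SOURCE B (Python) =====
-- def edge_cloud_from_deployment_type(dt: str) -> tuple: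
--     """Extract (cloud, region) from deployment type like 'aws-edge-us-east-1'."""
--     i = dt.find("-edge")
--     if i == -1:
--         return "", ""
--     cloud = dt[:i]
--     rest = dt[i + 5:]
--     if cloud in ("aws", "gcp") and (rest == "" or rest[0] == "-"):
--         return cloud, rest[1:]
--     return "", ""
-- ===== Notes on version B (the rewrite author's own statement) =====
-- stated objective: alternative
-- what changed: B replaces A's loop over ('aws','gcp') with equality/startswith tests by a single dt.find('-edge') followed by slicing out the cloud and region and validating them, so the separator is located once instead of testing each candidate prefix.
import Mathlib
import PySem

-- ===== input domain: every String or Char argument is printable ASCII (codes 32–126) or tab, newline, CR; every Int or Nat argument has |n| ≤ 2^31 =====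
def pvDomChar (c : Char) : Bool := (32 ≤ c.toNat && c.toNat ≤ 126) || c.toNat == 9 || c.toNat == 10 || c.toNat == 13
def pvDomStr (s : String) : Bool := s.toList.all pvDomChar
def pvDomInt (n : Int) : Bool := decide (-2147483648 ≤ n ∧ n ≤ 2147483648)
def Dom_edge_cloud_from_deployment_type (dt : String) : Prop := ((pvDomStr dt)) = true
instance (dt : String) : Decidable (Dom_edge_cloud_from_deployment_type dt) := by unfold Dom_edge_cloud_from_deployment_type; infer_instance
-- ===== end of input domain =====

-- B locates the '-edge' separator once with str.find and slices cloud/region out, instead of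
-- A's loop over the candidate clouds with equality and startswith tests (alternative structure).


-- ===== PORT A =====
-- the 'for cloud in ("aws", "gcp")' loop, with early return
def ecLoopA (dt : String) : List String → String × String
  | [] => ("", "")
  | cloud :: rest =>
    let pre := cloud ++ "-edge"
    if dt = pre then (cloud, "")
    else if PySem.Str.startswith dt (pre ++ "-") then
      (cloud, PySem.Str.slice dt (some (PySem.Str.len pre + 1)) none)
    else ecLoopA dt rest

def edge_cloud_from_deployment_type (dt : String) : String × String :=
  ecLoopA dt ["aws", "gcp"]

-- ===== PORT B =====
def edge_cloud_from_deployment_type_alt (dt : String) : String × String :=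
  let i := PySem.Str.find dt "-edge"
  if i = -1 then ("", "")
  else
    let cloud := PySem.Str.slice dt none (some i)
    let rest := PySem.Str.slice dt (some (i + 5)) none
    if (cloud = "aws" ∨ cloud = "gcp") ∧ (rest = "" ∨ PySem.Str.pyGet? rest 0 = some '-') then
      (cloud, PySem.Str.slice rest (some 1) none)
    else ("", "")

-- ===== PRECONDITION & SPEC =====
def Spec_edge_cloud_from_deployment_type (dt : String) (out : String × String) : Prop := out = edge_cloud_from_deployment_type_alt dt
instance (dt : String) (out : String × String) : Decidable (Spec_edge_cloud_from_deployment_type dt out) := by unfold Spec_edge_cloud_from_deployment_type; infer_instance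

-- ===== CLAIM (what is proved, stated in full; the proofs are below) =====
def Claim_equal_edge_cloud_from_deployment_type : Prop := ∀ (dt : String), Dom_edge_cloud_from_deployment_type dt → Spec_edge_cloud_from_deployment_type dt (edge_cloud_from_deployment_type dt)

-- ===== LEMMAS AND PROOFS =====

theorem toList_dashedge : ("-edge" : String).toList = ['-', 'e', 'd', 'g', 'e'] := by decide
theorem toList_aws : ("aws" : String).toList = ['a', 'w', 's'] := by decide
theorem toList_gcp : ("gcp" : String).toList = ['g', 'c', 'p'] := by decide
theorem toList_awsedge : ("aws-edge" : String).toList = ['a', 'w', 's', '-', 'e', 'd', 'g', 'e'] := by decide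
theorem toList_gcpedge : ("gcp-edge" : String).toList = ['g', 'c', 'p', '-', 'e', 'd', 'g', 'e'] := by decide
theorem toList_awsedge' : ("aws-edge-" : String).toList = ['a', 'w', 's', '-', 'e', 'd', 'g', 'e', '-'] := by decide
theorem toList_gcpedge' : ("gcp-edge-" : String).toList = ['g', 'c', 'p', '-', 'e', 'd', 'g', 'e', '-'] := by decide
theorem app_aws : ("aws" : String) ++ "-edge" = "aws-edge" := by decide
theorem app_gcp : ("gcp" : String) ++ "-edge" = "gcp-edge" := by decide
theorem app_aws' : ("aws-edge" : String) ++ "-" = "aws-edge-" := by decide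
theorem app_gcp' : ("gcp-edge" : String) ++ "-" = "gcp-edge-" := by decide
theorem len_awsedge : PySem.Str.len ("aws-edge" : String) = 8 := by decide
theorem len_gcpedge : PySem.Str.len ("gcp-edge" : String) = 8 := by decide

-- A's nested ifs written out (loop over ["aws","gcp"] unrolled)
theorem A_eq (dt : String) :
    edge_cloud_from_deployment_type dt =
      (if dt = "aws-edge" then ("aws", "")
       else if PySem.Str.startswith dt "aws-edge-" then ("aws", PySem.Str.slice dt (some 9) none)
       else if dt = "gcp-edge" then ("gcp", "")
       else if PySem.Str.startswith dt "gcp-edge-" then ("gcp", PySem.Str.slice dt (some 9) none)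
       else ("", "")) := by
  simp only [edge_cloud_from_deployment_type, ecLoopA, app_aws, app_gcp, app_aws', app_gcp',
    len_awsedge, len_gcpedge]
  norm_num
  split_ifs <;> rfl

-- '-edge' first occurs at index 3 when the first three characters are not '-'
theorem find_sep_at_three (c0 c1 c2 : Char) (h0 : c0 ≠ '-') (h1 : c1 ≠ '-') (h2 : c2 ≠ '-')
    (t : List Char) :
    PySem.Chars.find (c0 :: c1 :: c2 :: '-' :: 'e' :: 'd' :: 'g' :: 'e' :: t) ['-', 'e', 'd', 'g', 'e'] = 3 := by
  have hocc : ['-', 'e', 'd', 'g', 'e'] <+: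
      List.drop 3 (c0 :: c1 :: c2 :: '-' :: 'e' :: 'd' :: 'g' :: 'e' :: t) := ⟨t, by simp⟩
  have hinf : ['-', 'e', 'd', 'g', 'e'] <:+: (c0 :: c1 :: c2 :: '-' :: 'e' :: 'd' :: 'g' :: 'e' :: t) :=
    ⟨[c0, c1, c2], t, by simp⟩
  have h0f : 0 ≤ PySem.Chars.find (c0 :: c1 :: c2 :: '-' :: 'e' :: 'd' :: 'g' :: 'e' :: t) ['-', 'e', 'd', 'g', 'e'] :=
    (PySem.Chars.find_nonneg_iff _ _).mpr hinf
  obtain ⟨hpre, hmin⟩ := PySem.Chars.find_spec h0f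
  set f := PySem.Chars.find (c0 :: c1 :: c2 :: '-' :: 'e' :: 'd' :: 'g' :: 'e' :: t) ['-', 'e', 'd', 'g', 'e'] with hf
  have hle : f.toNat ≤ 3 := by
    by_contra h
    push Not at h
    exact hmin 3 h hocc
  have ne0 : f.toNat ≠ 0 := by
    intro h
    rw [h] at hpre
    obtain ⟨u, hu⟩ := hpre
    simp only [List.cons_append, List.drop, List.cons.injEq] at hu
    exact h0 hu.1.symm
  have ne1 : f.toNat ≠ 1 := by
    intro h
    rw [h] at hpre
    obtain ⟨u, hu⟩ := hpre
    simp only [List.cons_append, List.drop, List.cons.injEq] at hu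
    exact h1 hu.1.symm
  have ne2 : f.toNat ≠ 2 := by
    intro h
    rw [h] at hpre
    obtain ⟨u, hu⟩ := hpre
    simp only [List.cons_append, List.drop, List.cons.injEq] at hu
    exact h2 hu.1.symm
  omega

-- main equality
theorem main_eq (dt : String) :
    edge_cloud_from_deployment_type dt = edge_cloud_from_deployment_type_alt dt := by
  rw [A_eq]
  by_cases haws : ['a', 'w', 's', '-', 'e', 'd', 'g', 'e'] <+: dt.toList
  · -- dt starts with "aws-edge"
    obtain ⟨t, ht⟩ := haws
    have hfind : PySem.Str.find dt "-edge" = 3 := by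
      rw [PySem.Str.find_eq, toList_dashedge, ← ht]
      simp only [List.cons_append, List.nil_append]
      exact find_sep_at_three 'a' 'w' 's' (by decide) (by decide) (by decide) t
    have hcloud : PySem.Str.slice dt none (some 3) = "aws" := by
      rw [← String.toList_inj, PySem.Str.toList_slice, PySem.Chars.slice_eq_listSlice,
        PySem.List.slice_to _ (by norm_num), ← ht, toList_aws]
      simp
    have hrest : (PySem.Str.slice dt (some ((3 : Int) + 5)) none).toList = t := by
      rw [PySem.Str.toList_slice, PySem.Chars.slice_eq_listSlice,
        PySem.List.slice_from _ (by norm_num), ← ht]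
      simp
    simp only [edge_cloud_from_deployment_type_alt]
    rw [hfind, hcloud, if_neg (show ¬(3 : Int) = -1 by norm_num)]
    rcases t with _ | ⟨c, t'⟩
    · -- dt = "aws-edge"
      have hdt : dt = "aws-edge" := by
        rw [← String.toList_inj, ← ht, toList_awsedge]
        simp
      have hrest0 : PySem.Str.slice dt (some ((3 : Int) + 5)) none = "" := by
        rw [← String.toList_inj, hrest]
        rfl
      rw [if_pos hdt, hrest0]
      rw [if_pos (show (("aws" : String) = "aws" ∨ ("aws" : String) = "gcp") ∧
            (("" : String) = "" ∨ PySem.Str.pyGet? "" 0 = some '-') from ⟨Or.inl rfl, Or.inl rfl⟩)]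
      decide
    · by_cases hc : c = '-'
      · -- dt = "aws-edge-" ++ t'
        subst hc
        have hne : dt ≠ "aws-edge" := by
          intro he
          rw [he, toList_awsedge] at ht
          have := congrArg List.length ht
          simp at this
        have hsw : PySem.Str.startswith dt "aws-edge-" = true := by
          rw [PySem.Str.startswith_eq, PySem.Chars.startswith_iff, toList_awsedge']
          exact ⟨t', by rw [← ht]; simp⟩
        have hr0 : PySem.Str.pyGet? (PySem.Str.slice dt (some ((3 : Int) + 5)) none) 0 = some '-' := by
          rw [show (0 : Int) = ((0 : Nat) : Int) from rfl, PySem.Str.pyGet?_natCast, hrest]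
          rfl
        rw [if_neg hne, if_pos hsw]
        rw [if_pos (show (("aws" : String) = "aws" ∨ ("aws" : String) = "gcp") ∧
              (PySem.Str.slice dt (some ((3 : Int) + 5)) none = "" ∨
                PySem.Str.pyGet? (PySem.Str.slice dt (some ((3 : Int) + 5)) none) 0 = some '-')
            from ⟨Or.inl rfl, Or.inr hr0⟩)]
        have hsec : PySem.Str.slice dt (some 9) none =
            PySem.Str.slice (PySem.Str.slice dt (some ((3 : Int) + 5)) none) (some 1) none := by
          rw [← String.toList_inj, PySem.Str.toList_slice, PySem.Str.toList_slice,
            PySem.Chars.slice_eq_listSlice, PySem.Chars.slice_eq_listSlice,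
            PySem.List.slice_from _ (by norm_num), PySem.List.slice_from _ (by norm_num),
            hrest, ← ht]
          simp
        rw [hsec]
      · -- near miss: "aws-edge" followed by something other than '-'
        have hne : dt ≠ "aws-edge" := by
          intro he
          rw [he, toList_awsedge] at ht
          have := congrArg List.length ht
          simp at this
        have hsw : ¬ PySem.Str.startswith dt "aws-edge-" = true := by
          rw [PySem.Str.startswith_eq, PySem.Chars.startswith_iff, toList_awsedge']
          rintro ⟨u, hu⟩
          rw [← ht] at hu
          simp only [List.cons_append, List.nil_append, List.cons.injEq] at hu
          exact hc hu.2.2.2.2.2.2.2.2.1.symm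
        have hne2 : dt ≠ "gcp-edge" := by
          intro he
          rw [he, toList_gcpedge] at ht
          simp only [List.cons_append, List.nil_append, List.cons.injEq] at ht
          exact absurd ht.1 (by decide)
        have hsw2 : ¬ PySem.Str.startswith dt "gcp-edge-" = true := by
          rw [PySem.Str.startswith_eq, PySem.Chars.startswith_iff, toList_gcpedge']
          rintro ⟨u, hu⟩
          rw [← ht] at hu
          simp only [List.cons_append, List.nil_append, List.cons.injEq] at hu
          exact absurd hu.1 (by decide)
        rw [if_neg hne, if_neg hsw, if_neg hne2, if_neg hsw2]
        have hr0 : PySem.Str.pyGet? (PySem.Str.slice dt (some ((3 : Int) + 5)) none) 0 = some c := by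
          rw [show (0 : Int) = ((0 : Nat) : Int) from rfl, PySem.Str.pyGet?_natCast, hrest]
          rfl
        have hrne : PySem.Str.slice dt (some ((3 : Int) + 5)) none ≠ "" := by
          intro he
          rw [he] at hrest
          simp at hrest
        rw [if_neg]
        rintro ⟨-, h2 | h2⟩
        · exact hrne h2
        · rw [hr0] at h2
          exact hc (Option.some_inj.mp h2)
  · by_cases hgcp : ['g', 'c', 'p', '-', 'e', 'd', 'g', 'e'] <+: dt.toList
    · -- dt starts with "gcp-edge"
      obtain ⟨t, ht⟩ := hgcp
      have hfind : PySem.Str.find dt "-edge" = 3 := by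
        rw [PySem.Str.find_eq, toList_dashedge, ← ht]
        simp only [List.cons_append, List.nil_append]
        exact find_sep_at_three 'g' 'c' 'p' (by decide) (by decide) (by decide) t
      have hcloud : PySem.Str.slice dt none (some 3) = "gcp" := by
        rw [← String.toList_inj, PySem.Str.toList_slice, PySem.Chars.slice_eq_listSlice,
          PySem.List.slice_to _ (by norm_num), ← ht, toList_gcp]
        simp
      have hrest : (PySem.Str.slice dt (some ((3 : Int) + 5)) none).toList = t := by
        rw [PySem.Str.toList_slice, PySem.Chars.slice_eq_listSlice,
          PySem.List.slice_from _ (by norm_num), ← ht]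
        simp
      have hne1 : dt ≠ "aws-edge" := by
        intro he
        rw [he, toList_awsedge] at ht
        simp only [List.cons_append, List.nil_append, List.cons.injEq] at ht
        exact absurd ht.1 (by decide)
      have hsw1 : ¬ PySem.Str.startswith dt "aws-edge-" = true := by
        rw [PySem.Str.startswith_eq, PySem.Chars.startswith_iff, toList_awsedge']
        rintro ⟨u, hu⟩
        rw [← ht] at hu
        simp only [List.cons_append, List.nil_append, List.cons.injEq] at hu
        exact absurd hu.1 (by decide)
      simp only [edge_cloud_from_deployment_type_alt]
      rw [hfind, hcloud, if_neg (show ¬(3 : Int) = -1 by norm_num)]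
      rw [if_neg hne1, if_neg hsw1]
      rcases t with _ | ⟨c, t'⟩
      · have hdt : dt = "gcp-edge" := by
          rw [← String.toList_inj, ← ht, toList_gcpedge]
          simp
        have hrest0 : PySem.Str.slice dt (some ((3 : Int) + 5)) none = "" := by
          rw [← String.toList_inj, hrest]
          rfl
        rw [if_pos hdt, hrest0]
        rw [if_pos (show (("gcp" : String) = "aws" ∨ ("gcp" : String) = "gcp") ∧
              (("" : String) = "" ∨ PySem.Str.pyGet? "" 0 = some '-') from ⟨Or.inr rfl, Or.inl rfl⟩)]
        decide
      · by_cases hc : c = '-'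
        · subst hc
          have hne : dt ≠ "gcp-edge" := by
            intro he
            rw [he, toList_gcpedge] at ht
            have := congrArg List.length ht
            simp at this
          have hsw : PySem.Str.startswith dt "gcp-edge-" = true := by
            rw [PySem.Str.startswith_eq, PySem.Chars.startswith_iff, toList_gcpedge']
            exact ⟨t', by rw [← ht]; simp⟩
          have hr0 : PySem.Str.pyGet? (PySem.Str.slice dt (some ((3 : Int) + 5)) none) 0 = some '-' := by
            rw [show (0 : Int) = ((0 : Nat) : Int) from rfl, PySem.Str.pyGet?_natCast, hrest]
            rfl
          rw [if_neg hne, if_pos hsw]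
          rw [if_pos (show (("gcp" : String) = "aws" ∨ ("gcp" : String) = "gcp") ∧
                (PySem.Str.slice dt (some ((3 : Int) + 5)) none = "" ∨
                  PySem.Str.pyGet? (PySem.Str.slice dt (some ((3 : Int) + 5)) none) 0 = some '-')
              from ⟨Or.inr rfl, Or.inr hr0⟩)]
          have hsec : PySem.Str.slice dt (some 9) none =
              PySem.Str.slice (PySem.Str.slice dt (some ((3 : Int) + 5)) none) (some 1) none := by
            rw [← String.toList_inj, PySem.Str.toList_slice, PySem.Str.toList_slice,
              PySem.Chars.slice_eq_listSlice, PySem.Chars.slice_eq_listSlice,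
              PySem.List.slice_from _ (by norm_num), PySem.List.slice_from _ (by norm_num),
              hrest, ← ht]
            simp
          rw [hsec]
        · have hne : dt ≠ "gcp-edge" := by
            intro he
            rw [he, toList_gcpedge] at ht
            have := congrArg List.length ht
            simp at this
          have hsw : ¬ PySem.Str.startswith dt "gcp-edge-" = true := by
            rw [PySem.Str.startswith_eq, PySem.Chars.startswith_iff, toList_gcpedge']
            rintro ⟨u, hu⟩
            rw [← ht] at hu
            simp only [List.cons_append, List.nil_append, List.cons.injEq] at hu
            exact hc hu.2.2.2.2.2.2.2.2.1.symm
          rw [if_neg hne, if_neg hsw]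
          have hr0 : PySem.Str.pyGet? (PySem.Str.slice dt (some ((3 : Int) + 5)) none) 0 = some c := by
            rw [show (0 : Int) = ((0 : Nat) : Int) from rfl, PySem.Str.pyGet?_natCast, hrest]
            rfl
          have hrne : PySem.Str.slice dt (some ((3 : Int) + 5)) none ≠ "" := by
            intro he
            rw [he] at hrest
            simp at hrest
          rw [if_neg]
          rintro ⟨-, h2 | h2⟩
          · exact hrne h2
          · rw [hr0] at h2
            exact hc (Option.some_inj.mp h2)
    · -- neither prefix: A returns ("",""); so must B
      have hne1 : dt ≠ "aws-edge" := by
        intro he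
        exact haws (he ▸ (toList_awsedge ▸ List.prefix_refl _))
      have hsw1 : ¬ PySem.Str.startswith dt "aws-edge-" = true := by
        rw [PySem.Str.startswith_eq, PySem.Chars.startswith_iff, toList_awsedge']
        intro h
        exact haws (List.IsPrefix.trans ⟨['-'], rfl⟩ h)
      have hne2 : dt ≠ "gcp-edge" := by
        intro he
        exact hgcp (he ▸ (toList_gcpedge ▸ List.prefix_refl _))
      have hsw2 : ¬ PySem.Str.startswith dt "gcp-edge-" = true := by
        rw [PySem.Str.startswith_eq, PySem.Chars.startswith_iff, toList_gcpedge']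
        intro h
        exact hgcp (List.IsPrefix.trans ⟨['-'], rfl⟩ h)
      rw [if_neg hne1, if_neg hsw1, if_neg hne2, if_neg hsw2]
      simp only [edge_cloud_from_deployment_type_alt]
      by_cases hf : PySem.Str.find dt "-edge" = -1
      · rw [if_pos hf]
      · have h0f : 0 ≤ PySem.Chars.find dt.toList ['-', 'e', 'd', 'g', 'e'] := by
          have h1 := PySem.Chars.neg_one_le_find dt.toList ("-edge" : String).toList
          rw [PySem.Str.find_eq] at hf
          rw [toList_dashedge] at h1 hf
          omega
        have h0f' : 0 ≤ PySem.Chars.find dt.toList ("-edge" : String).toList := by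
          rw [toList_dashedge]
          exact h0f
        obtain ⟨hpre, -⟩ := PySem.Chars.find_spec h0f'
        rw [toList_dashedge] at hpre
        have hnotaws : PySem.Str.slice dt none (some (PySem.Str.find dt "-edge")) ≠ "aws" := by
          intro he
          apply haws
          have htake : List.take (PySem.Chars.find dt.toList ['-', 'e', 'd', 'g', 'e']).toNat dt.toList
              = ['a', 'w', 's'] := by
            rw [← toList_aws, ← he, PySem.Str.toList_slice, PySem.Chars.slice_eq_listSlice,
              PySem.Str.find_eq, toList_dashedge, PySem.List.slice_to _ h0f]
          obtain ⟨u, hu⟩ := hpre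
          have hsplit := List.take_append_drop
            (PySem.Chars.find dt.toList ['-', 'e', 'd', 'g', 'e']).toNat dt.toList
          rw [htake, ← hu] at hsplit
          exact ⟨u, by rw [← hsplit]; simp⟩
        have hnotgcp : PySem.Str.slice dt none (some (PySem.Str.find dt "-edge")) ≠ "gcp" := by
          intro he
          apply hgcp
          have htake : List.take (PySem.Chars.find dt.toList ['-', 'e', 'd', 'g', 'e']).toNat dt.toList
              = ['g', 'c', 'p'] := by
            rw [← toList_gcp, ← he, PySem.Str.toList_slice, PySem.Chars.slice_eq_listSlice,
              PySem.Str.find_eq, toList_dashedge, PySem.List.slice_to _ h0f]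
          obtain ⟨u, hu⟩ := hpre
          have hsplit := List.take_append_drop
            (PySem.Chars.find dt.toList ['-', 'e', 'd', 'g', 'e']).toNat dt.toList
          rw [htake, ← hu] at hsplit
          exact ⟨u, by rw [← hsplit]; simp⟩
        rw [if_neg hf, if_neg]
        rintro ⟨h1 | h1, -⟩
        · exact hnotaws h1
        · exact hnotgcp h1

-- ===== VERDICT (by name: the statement is the Claim_ definition above) =====
theorem edge_cloud_from_deployment_type_spec : Claim_equal_edge_cloud_from_deployment_type := by
  intro dt _
  unfold Spec_edge_cloud_from_deployment_type
  exact main_eq dt
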